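-- pv_equiv track=rewrite | github.com/LucasConde22/TPs-TDA | Guías/1P/04-03-24/2.py | _maximizar_valor_rec
-- ===== SOURCE A (Python) =====
-- def _maximizar_valor_rec(ini, fin, monedas, memoization):
--     if ini > fin:
--         return 0
--
--     if (ini, fin) in memoization:
--         return memoization[(ini, fin)]
--
--     # Elije la primera y el hermano la primera o última buscando minimizar la ganancia de Pepe
--     ganancia_primera = monedas[ini] + min(_maximizar_valor_rec(ini + 2, fin, monedas, memoization),
--                                           _maximizar_valor_rec(ini + 1, fin - 1, monedas, memoization))
--
--     # Elije la última y el hermano la primera o última buscando minimizar la ganancia de Pepe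
--     ganancia_ultima = monedas[fin] + min(_maximizar_valor_rec(ini + 1, fin - 1, monedas, memoization),
--                                           _maximizar_valor_rec(ini, fin - 2, monedas, memoization))
--
--     ganancia = max(ganancia_primera, ganancia_ultima)
--     memoization[(ini, fin)] = ganancia
--     return ganancia
-- ===== SOURCE B (Python) =====
-- # B: bottom-up interval DP over the same recurrence (iterates lengths d = (fin-ini)%2, +2, ...),
-- # reading any preloaded memoization entries per cell; it does not write back to memoization
-- # (A mutates the dict; the equivalence claimed is about the RETURN value only).
-- def _maximizar_valor_rec(ini, fin, monedas, memoization):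
--     if ini > fin:
--         return 0
--     table = {}
--
--     def T(i, j):
--         return table[(i, j)] if i <= j else 0
--
--     for d in range((fin - ini) % 2, fin - ini + 1, 2):
--         for i in range(ini, fin - d + 1):
--             j = i + d
--             if (i, j) in memoization:
--                 table[(i, j)] = memoization[(i, j)]
--             else:
--                 table[(i, j)] = max(monedas[i] + min(T(i + 2, j), T(i + 1, j - 1)),
--                                     monedas[j] + min(T(i + 1, j - 1), T(i, j - 2)))
--     return table[(ini, fin)]
-- ===== Notes on version B (the rewrite author's own statement) =====
-- stated objective: alternative
-- what changed: Replaces A's top-down memoized recursion (which threads a mutated dict through four recursive calls) with a bottom-up interval DP that fills a fresh table by increasing interval length in steps of 2, consulting preloaded memoization entries per cell; B does not write back into the memoization dict, so the equivalence is about the return value only.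
-- outside the precondition, e.g. on _maximizar_valor_rec(0, 5, [1], {(0, 5): 7}): A returns 7, B raises IndexError
import Mathlib
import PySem

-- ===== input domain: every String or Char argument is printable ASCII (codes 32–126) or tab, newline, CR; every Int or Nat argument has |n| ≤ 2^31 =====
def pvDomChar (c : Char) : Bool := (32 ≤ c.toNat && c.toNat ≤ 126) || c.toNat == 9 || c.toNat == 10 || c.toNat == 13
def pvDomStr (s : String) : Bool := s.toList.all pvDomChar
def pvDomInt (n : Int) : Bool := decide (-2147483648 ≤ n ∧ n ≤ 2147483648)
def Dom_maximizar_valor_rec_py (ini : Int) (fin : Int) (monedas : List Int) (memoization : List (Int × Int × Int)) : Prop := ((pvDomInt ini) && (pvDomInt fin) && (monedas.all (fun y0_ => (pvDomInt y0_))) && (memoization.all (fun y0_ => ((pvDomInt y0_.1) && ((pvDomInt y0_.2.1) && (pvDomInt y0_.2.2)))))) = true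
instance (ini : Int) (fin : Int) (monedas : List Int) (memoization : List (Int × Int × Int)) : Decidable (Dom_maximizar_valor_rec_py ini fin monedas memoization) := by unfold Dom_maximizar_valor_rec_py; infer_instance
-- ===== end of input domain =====

-- B replaces A's top-down memoized recursion by a bottom-up interval DP over increasing
-- interval lengths (objective: alternative).  A mutates the memoization dict in place and B
-- does not; the equivalence proved here is about the RETURN value only.

-- ===== PORT A =====
-- monedas[k]: Python indexing with negative wrap; the default 0 is unreachable under Pre_
-- (every accessed index k satisfies -len ≤ k < len there).
def pvGet (monedas : List Int) (k : Int) : Int := (PySem.List.pyGet? monedas k).getD 0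

-- '(i, j) in memoization' / 'memoization[(i, j)]': first-match lookup in the association list.
def memoGet? (m : List (Int × Int × Int)) (i j : Int) : Option Int :=
  match m with
  | [] => none
  | p :: rest => if p.1 = i ∧ p.2.1 = j then some p.2.2 else memoGet? rest i j

-- 'memoization[(i, j)] = v': dict assignment — overwrite in place, append when the key is new.
def memoSet (m : List (Int × Int × Int)) (i j v : Int) : List (Int × Int × Int) :=
  match m with
  | [] => [(i, j, v)]
  | p :: rest => if p.1 = i ∧ p.2.1 = j then (i, j, v) :: rest else p :: memoSet rest i j v

-- A's recursion, threading the mutated memo dict through the four recursive calls in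
-- Python's evaluation order; returns (value, memo after the call).  The fuel argument is a
-- totality guard only (the interval shrinks by 2 per level, so fuel (fin - ini + 2).toNat is
-- never exhausted); it does not change the computation.
def pvRecA (monedas : List Int) (fuel : Nat) (ini fin : Int) (m : List (Int × Int × Int)) :
    Int × List (Int × Int × Int) :=
  match fuel with
  | 0 => (0, m)
  | fuel + 1 =>
    if ini > fin then (0, m)
    else
      match memoGet? m ini fin with
      | some v => (v, m)
      | none =>
        let r1 := pvRecA monedas fuel (ini + 2) fin m
        let r2 := pvRecA monedas fuel (ini + 1) (fin - 1) r1.2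
        let gp := pvGet monedas ini + min r1.1 r2.1
        let r3 := pvRecA monedas fuel (ini + 1) (fin - 1) r2.2
        let r4 := pvRecA monedas fuel ini (fin - 2) r3.2
        let gu := pvGet monedas fin + min r3.1 r4.1
        let g := max gp gu
        (g, memoSet r4.2 ini fin g)

def maximizar_valor_rec_py (ini : Int) (fin : Int) (monedas : List Int) (memoization : List (Int × Int × Int)) : Int :=
  (pvRecA monedas (fin - ini + 2).toNat ini fin memoization).1

-- ===== PORT B =====
-- B's helper T(i, j): table[(i, j)] for i ≤ j, else 0.  The key is always present when B
-- reads it (cells of length d read only cells of length d-2, filled on the previous pass),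
-- so the .getD 0 default is unreachable.
def pvT (table : PySem.Dict (Int × Int) Int) (i j : Int) : Int :=
  if i ≤ j then (table.get? (i, j)).getD 0 else 0

-- body of B's inner loop: fill cell (i, i+d)
def pvCellStep (monedas : List Int) (memo : List (Int × Int × Int)) (d : Int)
    (table : PySem.Dict (Int × Int) Int) (i : Int) : PySem.Dict (Int × Int) Int :=
  let j := i + d
  match memoGet? memo i j with
  | some v => table.insert (i, j) v
  | none => table.insert (i, j)
      (max (pvGet monedas i + min (pvT table (i + 2) j) (pvT table (i + 1) (j - 1)))
           (pvGet monedas j + min (pvT table (i + 1) (j - 1)) (pvT table i (j - 2))))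

-- B's inner loop: for i in range(ini, fin - d + 1)
def pvFillRow (monedas : List Int) (memo : List (Int × Int × Int)) (ini fin d : Int)
    (table : PySem.Dict (Int × Int) Int) : PySem.Dict (Int × Int) Int :=
  (PySem.List.pyRange ini (fin - d + 1) 1).foldl (pvCellStep monedas memo d) table

def maximizar_valor_rec_py_alt (ini : Int) (fin : Int) (monedas : List Int) (memoization : List (Int × Int × Int)) : Int :=
  if ini > fin then 0
  else
    let table := (PySem.List.pyRange (PySem.Int.mod (fin - ini) 2) (fin - ini + 1) 2).foldl
      (fun t d => pvFillRow monedas memoization ini fin d t) PySem.Dict.empty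
    (table.get? (ini, fin)).getD 0

-- ===== PRECONDITION & SPEC =====
-- Pre_ excludes exactly the inputs where either program raises IndexError (a coin index of the
-- interval outside Python range); in particular it excludes out-of-range intervals that A
-- escapes only because the full interval (or every needed subinterval) is preloaded in
-- memoization — there A returns the memo value while B, which fills smaller intervals first,
-- raises IndexError.
def Pre_maximizar_valor_rec_py (ini : Int) (fin : Int) (monedas : List Int) (memoization : List (Int × Int × Int)) : Prop :=
  ini > fin ∨ (-(monedas.length : Int) ≤ ini ∧ fin < (monedas.length : Int))
instance (ini : Int) (fin : Int) (monedas : List Int) (memoization : List (Int × Int × Int)) : Decidable (Pre_maximizar_valor_rec_py ini fin monedas memoization) := by unfold Pre_maximizar_valor_rec_py; infer_instance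

def pvWitness_maximizar_valor_rec_py : Int × Int × List Int × (List (Int × Int × Int)) :=
  (0, 3, [3, 5, 2, 7], [(1, 2, 9)])

def Spec_maximizar_valor_rec_py (ini : Int) (fin : Int) (monedas : List Int) (memoization : List (Int × Int × Int)) (out : Int) : Prop := out = maximizar_valor_rec_py_alt ini fin monedas memoization
instance (ini : Int) (fin : Int) (monedas : List Int) (memoization : List (Int × Int × Int)) (out : Int) : Decidable (Spec_maximizar_valor_rec_py ini fin monedas memoization out) := by unfold Spec_maximizar_valor_rec_py; infer_instance

-- ===== CLAIM (what is proved, stated in full; the proofs are below) =====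
def Claim_equal_maximizar_valor_rec_py : Prop := ∀ (ini : Int) (fin : Int) (monedas : List Int) (memoization : List (Int × Int × Int)), Dom_maximizar_valor_rec_py ini fin monedas memoization → Pre_maximizar_valor_rec_py ini fin monedas memoization → Spec_maximizar_valor_rec_py ini fin monedas memoization (maximizar_valor_rec_py ini fin monedas memoization)

-- ===== LEMMAS AND PROOFS =====

-- The common characterisation of both programs: the memo-aware game value of interval (i, j).
def pvVal (monedas : List Int) (memo : List (Int × Int × Int)) (i j : Int) : Int :=
  if i > j then 0
  else
    match memoGet? memo i j with
    | some v => v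
    | none =>
      max (pvGet monedas i + min (pvVal monedas memo (i + 2) j) (pvVal monedas memo (i + 1) (j - 1)))
          (pvGet monedas j + min (pvVal monedas memo (i + 1) (j - 1)) (pvVal monedas memo i (j - 2)))
termination_by (j - i + 2).toNat
decreasing_by all_goals omega

lemma pvVal_gt (monedas : List Int) (memo : List (Int × Int × Int)) (i j : Int) (h : i > j) :
    pvVal monedas memo i j = 0 := by rw [pvVal]; simp [h]

lemma pvVal_memo (monedas : List Int) (memo : List (Int × Int × Int)) (i j v : Int)
    (h : ¬ i > j) (hm : memoGet? memo i j = some v) : pvVal monedas memo i j = v := by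
  rw [pvVal]; simp [h, hm]

lemma pvVal_rec (monedas : List Int) (memo : List (Int × Int × Int)) (i j : Int)
    (h : ¬ i > j) (hm : memoGet? memo i j = none) :
    pvVal monedas memo i j =
      max (pvGet monedas i + min (pvVal monedas memo (i + 2) j) (pvVal monedas memo (i + 1) (j - 1)))
          (pvGet monedas j + min (pvVal monedas memo (i + 1) (j - 1)) (pvVal monedas memo i (j - 2))) := by
  rw [pvVal]; simp [h, hm]

lemma memoGet?_memoSet (m : List (Int × Int × Int)) (i j v i' j' : Int) :
    memoGet? (memoSet m i j v) i' j' =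
      if i' = i ∧ j' = j then some v else memoGet? m i' j' := by
  induction m with
  | nil =>
    simp only [memoSet, memoGet?]
    by_cases h : i' = i ∧ j' = j
    · rw [if_pos (by exact ⟨h.1.symm, h.2.symm⟩), if_pos h]
    · rw [if_neg (by exact fun hc => h ⟨hc.1.symm, hc.2.symm⟩), if_neg h]
  | cons p rest ih =>
    simp only [memoSet]
    by_cases h1 : p.1 = i ∧ p.2.1 = j
    · rw [if_pos h1]
      simp only [memoGet?]
      by_cases h : i' = i ∧ j' = j
      · rw [if_pos (by exact ⟨h.1.symm, h.2.symm⟩), if_pos h]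
      · rw [if_neg (by exact fun hc => h ⟨hc.1.symm, hc.2.symm⟩), if_neg h,
            if_neg (by exact fun hc => h ⟨hc.1 ▸ h1.1, hc.2 ▸ h1.2⟩)]
    · rw [if_neg h1]
      simp only [memoGet?]
      by_cases h2 : p.1 = i' ∧ p.2.1 = j'
      · rw [if_pos h2, if_pos h2,
            if_neg (by exact fun hc => h1 ⟨h2.1.trans hc.1, h2.2.trans hc.2⟩)]
      · rw [if_neg h2, if_neg h2, ih]

-- invariants of A's threaded memo dict
def pvInv (monedas : List Int) (memo0 m : List (Int × Int × Int)) : Prop :=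
  ∀ i j v, i ≤ j → memoGet? m i j = some v → v = pvVal monedas memo0 i j
def pvSub (memo0 m : List (Int × Int × Int)) : Prop :=
  ∀ i j v, memoGet? memo0 i j = some v → memoGet? m i j = some v

lemma pvRecA_correct (monedas : List Int) (memo0 : List (Int × Int × Int)) :
    ∀ (n : Nat) (ini fin : Int) (m : List (Int × Int × Int)),
      (fin - ini + 2).toNat ≤ n → pvInv monedas memo0 m → pvSub memo0 m →
      (pvRecA monedas n ini fin m).1 = pvVal monedas memo0 ini fin ∧
      pvInv monedas memo0 (pvRecA monedas n ini fin m).2 ∧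
      pvSub memo0 (pvRecA monedas n ini fin m).2 := by
  intro n
  induction n with
  | zero =>
    intro ini fin m hn hInv hSub
    have hgt : ini > fin := by omega
    rw [pvRecA, pvVal_gt _ _ _ _ hgt]
    exact ⟨rfl, hInv, hSub⟩
  | succ n ih =>
    intro ini fin m hn hInv hSub
    by_cases hgt : ini > fin
    · rw [pvRecA, if_pos hgt, pvVal_gt _ _ _ _ hgt]
      exact ⟨rfl, hInv, hSub⟩
    · rw [pvRecA, if_neg hgt]
      cases hm : memoGet? m ini fin with
      | some v =>
        simp only
        exact ⟨hInv ini fin v (by omega) hm, hInv, hSub⟩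
      | none =>
        simp only
        have hm0 : memoGet? memo0 ini fin = none := by
          cases h0 : memoGet? memo0 ini fin with
          | none => rfl
          | some w => rw [hSub ini fin w h0] at hm; exact absurd hm (by simp)
        obtain ⟨e1, i1, s1⟩ := ih (ini + 2) fin m (by omega) hInv hSub
        obtain ⟨e2, i2, s2⟩ := ih (ini + 1) (fin - 1) (pvRecA monedas n (ini + 2) fin m).2 (by omega) i1 s1
        obtain ⟨e3, i3, s3⟩ := ih (ini + 1) (fin - 1) (pvRecA monedas n (ini + 1) (fin - 1) (pvRecA monedas n (ini + 2) fin m).2).2 (by omega) i2 s2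
        obtain ⟨e4, i4, s4⟩ := ih ini (fin - 2) (pvRecA monedas n (ini + 1) (fin - 1) (pvRecA monedas n (ini + 1) (fin - 1) (pvRecA monedas n (ini + 2) fin m).2).2).2 (by omega) i3 s3
        have hval : max (pvGet monedas ini + min (pvRecA monedas n (ini + 2) fin m).1 (pvRecA monedas n (ini + 1) (fin - 1) (pvRecA monedas n (ini + 2) fin m).2).1)
            (pvGet monedas fin + min (pvRecA monedas n (ini + 1) (fin - 1) (pvRecA monedas n (ini + 1) (fin - 1) (pvRecA monedas n (ini + 2) fin m).2).2).1
              (pvRecA monedas n ini (fin - 2) (pvRecA monedas n (ini + 1) (fin - 1) (pvRecA monedas n (ini + 1) (fin - 1) (pvRecA monedas n (ini + 2) fin m).2).2).2).1)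
            = pvVal monedas memo0 ini fin := by
          rw [pvVal_rec _ _ _ _ hgt hm0, e1, e2, e3, e4]
        refine ⟨hval, ?_, ?_⟩
        · intro i j v hij hg
          rw [memoGet?_memoSet] at hg
          by_cases hk : i = ini ∧ j = fin
          · rw [if_pos hk] at hg
            obtain ⟨rfl, rfl⟩ := hk
            rw [← hval]
            exact ((Option.some.injEq _ _).mp hg).symm
          · rw [if_neg hk] at hg
            exact i4 i j v hij hg
        · intro i j v hg
          rw [memoGet?_memoSet]
          by_cases hk : i = ini ∧ j = fin
          · obtain ⟨rfl, rfl⟩ := hk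
            rw [hg] at hm0; exact absurd hm0 (by simp)
          · rw [if_neg hk]
            exact s4 i j v hg

lemma a_eq_val (ini fin : Int) (monedas : List Int) (memo : List (Int × Int × Int)) :
    maximizar_valor_rec_py ini fin monedas memo = pvVal monedas memo ini fin := by
  unfold maximizar_valor_rec_py
  exact (pvRecA_correct monedas memo ((fin - ini + 2).toNat) ini fin memo le_rfl
    (fun i j v hij hm => (pvVal_memo monedas memo i j v (by omega) hm).symm)
    (fun i j v h => h)).1

-- invariants of B's table
def pvGood (monedas : List Int) (memo : List (Int × Int × Int))
    (table : PySem.Dict (Int × Int) Int) : Prop :=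
  ∀ p v, table.get? p = some v → v = pvVal monedas memo p.1 p.2
def pvCov (monedas : List Int) (memo : List (Int × Int × Int)) (ini fin : Int)
    (table : PySem.Dict (Int × Int) Int) (c : Int) : Prop :=
  ∀ i, ini ≤ i → i + c ≤ fin → table.get? (i, i + c) = some (pvVal monedas memo i (i + c))

lemma pvT_sub (monedas : List Int) (memo : List (Int × Int × Int)) (ini fin d : Int)
    (table : PySem.Dict (Int × Int) Int) (hd : 0 ≤ d)
    (hcov : 2 ≤ d → pvCov monedas memo ini fin table (d - 2))
    (a b : Int) (hb : b - a = d - 2) (ha : ini ≤ a) (hbf : b ≤ fin) :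
    pvT table a b = pvVal monedas memo a b := by
  by_cases h2 : 2 ≤ d
  · have hab : a ≤ b := by omega
    have hc := hcov h2 a ha (by omega)
    have hba : b = a + (d - 2) := by omega
    unfold pvT
    rw [if_pos hab, hba, hc]
    rfl
  · have : b < a := by omega
    unfold pvT
    rw [if_neg (by omega), pvVal_gt _ _ _ _ (by omega)]

lemma cellStep_eq (monedas : List Int) (memo : List (Int × Int × Int)) (ini fin d : Int)
    (hd : 0 ≤ d) (x : Int) (hx : ini ≤ x) (hxf : x + d ≤ fin)
    (table : PySem.Dict (Int × Int) Int)
    (hcov : 2 ≤ d → pvCov monedas memo ini fin table (d - 2)) :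
    pvCellStep monedas memo d table x = table.insert (x, x + d) (pvVal monedas memo x (x + d)) := by
  unfold pvCellStep
  cases hm : memoGet? memo x (x + d) with
  | some v => simp only [hm]; rw [pvVal_memo _ _ _ _ _ (by omega) hm]
  | none =>
    simp only [hm]
    rw [pvVal_rec _ _ _ _ (by omega) hm,
        pvT_sub monedas memo ini fin d table hd hcov (x + 2) (x + d) (by omega) (by omega) (by omega),
        pvT_sub monedas memo ini fin d table hd hcov (x + 1) (x + d - 1) (by omega) (by omega) (by omega),
        pvT_sub monedas memo ini fin d table hd hcov x (x + d - 2) (by omega) (by omega) (by omega)]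

lemma row_correct (monedas : List Int) (memo : List (Int × Int × Int)) (ini fin d : Int)
    (hd : 0 ≤ d) :
    ∀ (n : Nat) (x : Int) (table : PySem.Dict (Int × Int) Int),
      (fin - d + 1 - x).toNat ≤ n → ini ≤ x →
      pvGood monedas memo table →
      (2 ≤ d → pvCov monedas memo ini fin table (d - 2)) →
      pvGood monedas memo ((PySem.List.pyRange x (fin - d + 1) 1).foldl (pvCellStep monedas memo d) table) ∧
      (2 ≤ d → pvCov monedas memo ini fin ((PySem.List.pyRange x (fin - d + 1) 1).foldl (pvCellStep monedas memo d) table) (d - 2)) ∧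
      (∀ i, x ≤ i → i + d ≤ fin →
        ((PySem.List.pyRange x (fin - d + 1) 1).foldl (pvCellStep monedas memo d) table).get? (i, i + d) = some (pvVal monedas memo i (i + d))) ∧
      (∀ p v, table.get? p = some v →
        ((PySem.List.pyRange x (fin - d + 1) 1).foldl (pvCellStep monedas memo d) table).get? p = some v) := by
  intro n
  induction n with
  | zero =>
    intro x table hn hx hg hcov
    rw [PySem.List.pyRange_one_eq_nil (by omega)]
    exact ⟨hg, hcov, fun i hi hif => absurd hif (by omega), fun p v h => h⟩
  | succ n ih =>
    intro x table hn hx hg hcov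
    by_cases hend : fin - d + 1 ≤ x
    · rw [PySem.List.pyRange_one_eq_nil hend]
      exact ⟨hg, hcov, fun i hi hif => absurd hif (by omega), fun p v h => h⟩
    · rw [PySem.List.pyRange_one_cons (by omega), List.foldl_cons]
      have hxf : x + d ≤ fin := by omega
      have hstep := cellStep_eq monedas memo ini fin d hd x hx hxf table hcov
      have hg1 : pvGood monedas memo (pvCellStep monedas memo d table x) := by
        intro p v h
        rw [hstep, PySem.Dict.get?_insert] at h
        split_ifs at h with hp
        · subst hp; exact ((Option.some.injEq _ _).mp h).symm
        · exact hg p v h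
      have hcov1 : 2 ≤ d → pvCov monedas memo ini fin (pvCellStep monedas memo d table x) (d - 2) := by
        intro h2 i hi hif
        rw [hstep, PySem.Dict.get?_insert, if_neg (by intro hc; injection hc with h1 h2; omega)]
        exact hcov h2 i hi hif
      obtain ⟨g', c', cells', pres'⟩ := ih (x + 1) (pvCellStep monedas memo d table x) (by omega) (by omega) hg1 hcov1
      refine ⟨g', c', ?_, ?_⟩
      · intro i hi hif
        by_cases hix : i = x
        · subst hix
          apply pres'
          rw [hstep]
          exact PySem.Dict.get?_insert_self _ _ _
        · exact cells' i (by omega) hif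
      · intro p v h
        apply pres'
        rw [hstep, PySem.Dict.get?_insert]
        split_ifs with hp
        · subst hp
          exact congrArg some (hg (x, x + d) v h).symm
        · exact h

lemma outer_correct (monedas : List Int) (memo : List (Int × Int × Int)) (ini fin r : Int)
    (hr0 : 0 ≤ r) (hr2 : r < 2) :
    ∀ (m : Nat),
      pvGood monedas memo (((List.range m).map (fun k : Nat => r + 2 * (k : Int))).foldl
        (fun t d => pvFillRow monedas memo ini fin d t) PySem.Dict.empty) ∧
      (∀ M : Nat, m = M + 1 →
        pvCov monedas memo ini fin (((List.range m).map (fun k : Nat => r + 2 * (k : Int))).foldl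
          (fun t d => pvFillRow monedas memo ini fin d t) PySem.Dict.empty) (r + 2 * M)) := by
  intro m
  induction m with
  | zero =>
    refine ⟨?_, fun M hM => absurd hM (by omega)⟩
    intro p v h
    simp [PySem.Dict.get?_empty] at h
  | succ m ih =>
    rw [List.range_succ, List.map_append, List.foldl_append]
    simp only [List.map_cons, List.map_nil, List.foldl_cons, List.foldl_nil]
    have hcovprev : 2 ≤ r + 2 * (m : Int) →
        pvCov monedas memo ini fin (((List.range m).map (fun k : Nat => r + 2 * (k : Int))).foldl
          (fun t d => pvFillRow monedas memo ini fin d t) PySem.Dict.empty) (r + 2 * (m : Int) - 2) := by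
      intro h2
      have hm1 : 1 ≤ m := by omega
      have hih := ih.2 (m - 1) (by omega)
      have e : r + 2 * ((m - 1 : Nat) : Int) = r + 2 * (m : Int) - 2 := by omega
      rwa [e] at hih
    have hrr := row_correct monedas memo ini fin (r + 2 * (m : Int)) (by omega)
      ((fin - (r + 2 * (m : Int)) + 1 - ini).toNat) ini
      (((List.range m).map (fun k : Nat => r + 2 * (k : Int))).foldl
        (fun t d => pvFillRow monedas memo ini fin d t) PySem.Dict.empty)
      le_rfl le_rfl ih.1 hcovprev
    refine ⟨?_, ?_⟩
    · exact (by simpa only [pvFillRow] using hrr.1)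
    · intro M hM
      have hMm : M = m := by omega
      subst hMm
      intro i hi hif
      simpa only [pvFillRow] using hrr.2.2.1 i hi hif

lemma alt_eq_val (ini fin : Int) (monedas : List Int) (memo : List (Int × Int × Int)) :
    maximizar_valor_rec_py_alt ini fin monedas memo = pvVal monedas memo ini fin := by
  by_cases hgt : ini > fin
  · unfold maximizar_valor_rec_py_alt
    rw [if_pos hgt, pvVal_gt _ _ _ _ hgt]
  · unfold maximizar_valor_rec_py_alt
    rw [if_neg hgt]
    simp only
    have h2 : (0:Int) < 2 := by norm_num
    have hrm : PySem.Int.mod (fin - ini) 2 = (fin - ini) % 2 := PySem.Int.mod_eq_emod_of_pos h2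
    set r := PySem.Int.mod (fin - ini) 2 with hr
    have hr0 : 0 ≤ r := by omega
    have hr2 : r < 2 := by omega
    obtain ⟨M, hM⟩ : ∃ M : Nat, fin - ini = r + 2 * (M : Int) :=
      ⟨(((fin - ini) - r) / 2).toNat, by omega⟩
    rw [PySem.List.pyRange_of_pos r (fin - ini + 1) h2]
    have hN : (if r < fin - ini + 1 then ((fin - ini + 1 - r + 2 - 1) / 2).toNat else 0) = M + 1 := by
      rw [if_pos (by omega)]; omega
    rw [hN]
    have hcov := (outer_correct monedas memo ini fin r hr0 hr2 (M + 1)).2 M rfl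
    have hfin := hcov ini le_rfl (by omega)
    rw [show ini + (r + 2 * (M : Int)) = fin from by omega] at hfin
    rw [hfin]
    rfl

-- ===== VERDICT (by name: the statement is the Claim_ definition above) =====
theorem maximizar_valor_rec_py_spec : Claim_equal_maximizar_valor_rec_py := by
  intro ini fin monedas memoization _ _
  unfold Spec_maximizar_valor_rec_py
  rw [a_eq_val, alt_eq_val]
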